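-- pv_equiv track=rewrite | github.com/justvanrossum/fontgoggles | Lib/fontgoggles/misc/hbShape.py | characterGlyphMapping
-- ===== SOURCE A (Python) =====
-- from collections import defaultdict
-- import itertools
--
-- def characterGlyphMapping(clusters, numChars):
--     """This implements character to glyph mapping and vice versa, using
--     cluster information from HarfBuzz. It should be correct for HB
--     clustering support levels 0 and 1, see:
--
--         https://harfbuzz.github.io/working-with-harfbuzz-clusters.html
--
--     "Each character belongs to the cluster that has the highest cluster
--     value not larger than its initial cluster value.""
--     """
--
--     if clusters:
--         if clusters[-1] != 0:
--             assert clusters[0] == 0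
--
--     clusterToChars = {}
--     charToCluster = {}
--     for cl, clNext in _pairs(sorted(set(clusters)), numChars):
--         chars = list(range(cl, clNext))
--         clusterToChars[cl] = chars
--         for char in chars:
--             charToCluster[char] = cl
--
--     glyphToChars = [clusterToChars[cl] for cl in clusters]
--
--     charToGlyphs = defaultdict(list)
--     for glyphIndex, charIndices in enumerate(glyphToChars):
--         for ci in charIndices:
--             charToGlyphs[ci].append(glyphIndex)
--
--     # assert sorted(charToGlyphs) == list(range(numChars)), charToGlyphs
--     charToGlyphs = [charToGlyphs[ci] for ci in sorted(charToGlyphs)]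
--
--     return glyphToChars, charToGlyphs
--
-- def _pairs(seq, sentinel):
--     it = itertools.chain(seq, (sentinel,))
--     prev = next(it)
--     for i in it:
--         yield prev, i
--         prev = i
-- ===== SOURCE B (Python) =====
-- from collections import defaultdict
--
-- def characterGlyphMapping(clusters, numChars):
--     if clusters:
--         if clusters[-1] != 0:
--             assert clusters[0] == 0
--     # Index glyphs by cluster in one pass, then one forward pass over the
--     # sorted unique clusters builds both mappings (no invert-then-resort).
--     clusterToGlyphs = defaultdict(list)
--     for glyphIndex, cl in enumerate(clusters):
--         clusterToGlyphs[cl].append(glyphIndex)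
--     uniq = sorted(clusterToGlyphs)
--     clusterToChars = {}
--     charToGlyphs = []
--     for cl, clNext in zip(uniq, uniq[1:] + [numChars]):
--         chars = list(range(cl, clNext))
--         clusterToChars[cl] = chars
--         charToGlyphs.extend([clusterToGlyphs[cl]] * len(chars))
--     glyphToChars = [clusterToChars[cl] for cl in clusters]
--     return glyphToChars, charToGlyphs
-- ===== Notes on version B (the rewrite author's own statement) =====
-- stated objective: simpler
-- what changed: B indexes glyphs by cluster in one enumerate pass and emits charToGlyphs directly in a single forward sweep over the sorted cluster ranges (extending by the per-cluster glyph list), instead of A's building glyphToChars, inverting it with a nested loop into a defaultdict and re-sorting its keys.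
import Mathlib
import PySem

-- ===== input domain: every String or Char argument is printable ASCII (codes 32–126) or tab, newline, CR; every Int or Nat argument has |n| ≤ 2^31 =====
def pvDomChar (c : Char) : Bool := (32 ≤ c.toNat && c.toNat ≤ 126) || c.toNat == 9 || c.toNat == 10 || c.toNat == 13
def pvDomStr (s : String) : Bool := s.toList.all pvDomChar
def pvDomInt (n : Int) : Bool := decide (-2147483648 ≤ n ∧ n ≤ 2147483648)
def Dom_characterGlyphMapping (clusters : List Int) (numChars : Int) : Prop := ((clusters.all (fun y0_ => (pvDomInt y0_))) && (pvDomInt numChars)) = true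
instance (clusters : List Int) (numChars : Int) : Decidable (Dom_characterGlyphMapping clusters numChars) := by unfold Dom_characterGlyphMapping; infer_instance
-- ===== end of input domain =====

-- B builds a cluster→glyphs index in one pass and emits charToGlyphs in a single
-- forward sweep over the sorted cluster ranges, instead of A's invert-then-resort
-- (objective: simpler decomposition, same result; same assert, same domain).

-- ===== PORT A =====
-- A's _pairs generator over sorted(set(clusters)) with numChars chained as sentinel
def pvPairs (seq : List Int) (sentinel : Int) : List (Int × Int) :=
  List.zip seq (seq.drop 1 ++ [sentinel])

def characterGlyphMapping (clusters : List Int) (numChars : Int) : List (List Int) × List (List Int) :=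
  -- the Python assert only RAISES (those inputs are outside Pre_); it computes nothing.
  -- charToCluster is also built by the Python but never read afterwards; omitted.
  let uniq := PySem.List.sorted (PySem.Set.ofList clusters) (fun x => x)
  let clusterToChars : PySem.Dict Int (List Int) :=
    (pvPairs uniq numChars).foldl
      (fun d p => d.insert p.1 (PySem.List.pyRange p.1 p.2 1)) PySem.Dict.empty
  let glyphToChars := clusters.map (fun cl => clusterToChars.getD cl [])
  let charToGlyphs : PySem.Dict Int (List Int) :=
    (PySem.List.enumerate glyphToChars 0).foldl
      (fun d p => p.2.foldl (fun d ci => d.modify ci [] (· ++ [p.1])) d) PySem.Dict.empty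
  (glyphToChars,
   (PySem.List.sorted charToGlyphs.keys (fun x => x)).map (fun ci => charToGlyphs.getD ci []))

-- ===== PORT B =====
-- B keeps A's cluster-validity assert; it only RAISES (outside Pre_), computing nothing.
def characterGlyphMapping_alt (clusters : List Int) (numChars : Int) : List (List Int) × List (List Int) :=
  let clusterToGlyphs : PySem.Dict Int (List Int) :=
    (PySem.List.enumerate clusters 0).foldl
      (fun d p => d.modify p.2 [] (· ++ [p.1])) PySem.Dict.empty
  let uniq := PySem.List.sorted clusterToGlyphs.keys (fun x => x)
  let st :=
    (List.zip uniq (uniq.drop 1 ++ [numChars])).foldl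
      (fun (st : PySem.Dict Int (List Int) × List (List Int)) p =>
        let chars := PySem.List.pyRange p.1 p.2 1
        (st.1.insert p.1 chars,
         st.2 ++ List.replicate chars.length (clusterToGlyphs.getD p.1 [])))
      (PySem.Dict.empty, [])
  (clusters.map (fun cl => st.1.getD cl []), st.2)

-- ===== PRECONDITION & SPEC =====
-- Pre_ excludes exactly the inputs on which A's assert raises AssertionError:
-- a nonempty clusters list whose first and last entries are both nonzero.
def Pre_characterGlyphMapping (clusters : List Int) (numChars : Int) : Prop :=
  clusters = [] ∨ clusters.head? = some 0 ∨ clusters.getLast? = some 0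
instance (clusters : List Int) (numChars : Int) : Decidable (Pre_characterGlyphMapping clusters numChars) := by unfold Pre_characterGlyphMapping; infer_instance
def pvWitness_characterGlyphMapping : List Int × Int := ([0, 2], 3)

def Spec_characterGlyphMapping (clusters : List Int) (numChars : Int) (out : List (List Int) × List (List Int)) : Prop := out = characterGlyphMapping_alt clusters numChars
instance (clusters : List Int) (numChars : Int) (out : List (List Int) × List (List Int)) : Decidable (Spec_characterGlyphMapping clusters numChars out) := by unfold Spec_characterGlyphMapping; infer_instance

-- ===== CLAIM (what is proved, stated in full; the proofs are below) =====
def Claim_equal_characterGlyphMapping : Prop := ∀ (clusters : List Int) (numChars : Int), Dom_characterGlyphMapping clusters numChars → Pre_characterGlyphMapping clusters numChars → Spec_characterGlyphMapping clusters numChars (characterGlyphMapping clusters numChars)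
-- ===== LEMMAS AND PROOFS =====

-- Abbreviations for the shared intermediate values of the two ports.
def pvU (clusters : List Int) : List Int :=
  PySem.List.sorted (PySem.Set.ofList clusters) (fun x => x)
def pvAll (u : List Int) (s : Int) : List Int :=
  (pvPairs u s).flatMap (fun p => PySem.List.pyRange p.1 p.2 1)
def pvCTC (u : List Int) (s : Int) : PySem.Dict Int (List Int) :=
  (pvPairs u s).foldl (fun d p => d.insert p.1 (PySem.List.pyRange p.1 p.2 1)) PySem.Dict.empty
def pvG2 (clusters : List Int) : PySem.Dict Int (List Int) :=
  (PySem.List.enumerate clusters 0).foldl (fun d p => d.modify p.2 [] (· ++ [p.1])) PySem.Dict.empty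
def pvG (clusters : List Int) (n : Int) : List (List Int) :=
  clusters.map (fun cl => (pvCTC (pvU clusters) n).getD cl [])
def pvDA (clusters : List Int) (n : Int) : PySem.Dict Int (List Int) :=
  (PySem.List.enumerate (pvG clusters n) 0).foldl
    (fun d p => p.2.foldl (fun d ci => d.modify ci [] (· ++ [p.1])) d) PySem.Dict.empty

lemma pvU_pairwise (clusters : List Int) : (pvU clusters).Pairwise (· < ·) :=
  PySem.List.sorted_ofList_pairwise_lt clusters

lemma mem_pvU (clusters : List Int) (x : Int) : x ∈ pvU clusters ↔ x ∈ clusters := by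
  rw [pvU, PySem.List.mem_sorted, PySem.Set.mem_ofList]

lemma map_fst_pvPairs (u : List Int) (s : Int) : (pvPairs u s).map Prod.fst = u := by
  apply List.map_fst_zip
  simp
  omega

lemma pvPairs_cons (a : Int) (u : List Int) (s : Int) :
    pvPairs (a :: u) s = (a, u.headD s) :: pvPairs u s := by
  cases u <;> simp [pvPairs]

lemma pvAll_cons (a : Int) (u : List Int) (s : Int) :
    pvAll (a :: u) s = PySem.List.pyRange a (u.headD s) 1 ++ pvAll u s := by
  simp [pvAll, pvPairs_cons]

lemma pvAll_lb (u : List Int) (s : Int) : ∀ x ∈ pvAll u s, ∃ c ∈ u, c ≤ x := by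
  induction u with
  | nil => simp [pvAll, pvPairs]
  | cons a u ih =>
    intro x hx
    rw [pvAll_cons, List.mem_append] at hx
    rcases hx with hx | hx
    · exact ⟨a, List.mem_cons_self, (PySem.List.mem_pyRange_one.mp hx).1⟩
    · obtain ⟨c, hc, hcx⟩ := ih x hx
      exact ⟨c, List.mem_cons_of_mem _ hc, hcx⟩

lemma pvAll_pairwise (u : List Int) (s : Int) (hu : u.Pairwise (· < ·)) :
    (pvAll u s).Pairwise (· < ·) := by
  induction u with
  | nil => simp [pvAll, pvPairs]
  | cons a u ih =>
    rw [pvAll_cons, List.pairwise_append]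
    refine ⟨PySem.List.pairwise_lt_pyRange_one _ _, ih hu.of_cons, ?_⟩
    intro y hy z hz
    obtain ⟨c, hc, hcz⟩ := pvAll_lb u s z hz
    have hy2 : y < u.headD s := (PySem.List.mem_pyRange_one.mp hy).2
    have : u.headD s ≤ c := by
      cases u with
      | nil => cases hc
      | cons b t =>
        simp only [List.headD_cons]
        rcases List.mem_cons.mp hc with rfl | hc
        · exact le_refl _
        · exact le_of_lt ((List.pairwise_cons.mp hu.of_cons).1 c hc)
    omega

lemma mem_pvAll (u : List Int) (s x : Int) :
    x ∈ pvAll u s ↔ ∃ p ∈ pvPairs u s, p.1 ≤ x ∧ x < p.2 := by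
  simp [pvAll, List.mem_flatMap, PySem.List.mem_pyRange_one]

lemma pvPairs_disjoint (u : List Int) (s : Int) (hu : u.Pairwise (· < ·))
    {p q : Int × Int} (hp : p ∈ pvPairs u s) (hq : q ∈ pvPairs u s)
    {x : Int} (hxp : p.1 ≤ x ∧ x < p.2) (hxq : q.1 ≤ x ∧ x < q.2) : p = q := by
  by_contra hne
  have hnd : (pvAll u s).Nodup := (pvAll_pairwise u s hu).imp (fun h => ne_of_lt h)
  rw [pvAll, List.nodup_flatMap] at hnd
  have hdisj := hnd.2.forall (fun a b h => List.Disjoint.symm h) hp hq hne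
  exact hdisj (PySem.List.mem_pyRange_one.mpr hxp) (PySem.List.mem_pyRange_one.mpr hxq)

lemma pvPairs_fst_inj (u : List Int) (s : Int) (hu : u.Pairwise (· < ·))
    {p q : Int × Int} (hp : p ∈ pvPairs u s) (hq : q ∈ pvPairs u s)
    (h : p.1 = q.1) : p = q := by
  have hnd : ((pvPairs u s).map Prod.fst).Nodup := by
    rw [map_fst_pvPairs]; exact hu.imp (fun h => ne_of_lt h)
  exact List.inj_on_of_nodup_map hnd hp hq h

lemma pvPairs_exists (u : List Int) (s : Int) {cl : Int} (hcl : cl ∈ u) :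
    ∃ p ∈ pvPairs u s, p.1 = cl := by
  have := map_fst_pvPairs u s
  rw [← this] at hcl
  obtain ⟨p, hp, hpe⟩ := List.mem_map.mp hcl
  exact ⟨p, hp, hpe⟩

lemma items_pvCTC (u : List Int) (s : Int) (hu : u.Pairwise (· < ·)) :
    (pvCTC u s).items = (pvPairs u s).map (fun p => (p.1, PySem.List.pyRange p.1 p.2 1)) := by
  have h := PySem.Dict.items_foldl_insert_fresh (pvPairs u s) Prod.fst
    (fun p => PySem.List.pyRange p.1 p.2 1) PySem.Dict.empty
    (by intro a _; simp) (by rw [map_fst_pvPairs]; exact hu.imp (fun h => ne_of_lt h))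
  simpa [pvCTC] using h

lemma keys_pvCTC (u : List Int) (s : Int) (hu : u.Pairwise (· < ·)) :
    (pvCTC u s).keys = u := by
  simp only [PySem.Dict.keys, items_pvCTC u s hu, List.map_map]
  exact map_fst_pvPairs u s

lemma getD_pvCTC (u : List Int) (s : Int) (hu : u.Pairwise (· < ·))
    {p : Int × Int} (hp : p ∈ pvPairs u s) :
    (pvCTC u s).getD p.1 [] = PySem.List.pyRange p.1 p.2 1 := by
  apply PySem.Dict.getD_of_mem_items
  · rw [items_pvCTC u s hu]
    exact List.mem_map.mpr ⟨p, hp, rfl⟩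
  · rw [keys_pvCTC u s hu]
    exact hu.imp (fun h => ne_of_lt h)

-- the grouping loop 'd[p.2].append(p.1)': lookup = defaults ++ collected firsts
lemma getD_foldl_modify_snd (l : List (Int × Int)) (d : PySem.Dict Int (List Int)) (c : Int) :
    (l.foldl (fun d p => d.modify p.2 [] (· ++ [p.1])) d).getD c [] =
      d.getD c [] ++ ((l.filter (fun p => p.2 == c)).map (·.1)) := by
  induction l generalizing d with
  | nil => simp
  | cons p t ih =>
    simp only [List.foldl_cons, ih, List.filter_cons]
    rw [PySem.Dict.getD_modify]
    by_cases h : c = p.2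
    · simp [h, List.append_assoc]
    · have h' : ¬ p.2 = c := fun hh => h hh.symm
      simp [h, h']

lemma getD_pvG2 (clusters : List Int) (c : Int) :
    (pvG2 clusters).getD c [] =
      ((PySem.List.enumerate clusters 0).filter (fun p => p.2 == c)).map (·.1) := by
  have h := getD_foldl_modify_snd (PySem.List.enumerate clusters 0) PySem.Dict.empty c
  simpa [pvG2] using h

lemma keys_pvG2 (clusters : List Int) :
    (pvG2 clusters).keys = PySem.Set.ofList clusters := by
  have h := PySem.Dict.keys_foldl_modify_key (PySem.List.enumerate clusters 0)
    Prod.snd ([] : List Int) (fun _ p v => v ++ [p.1]) PySem.Dict.empty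
  simpa [pvG2, PySem.List.map_snd_enumerate, PySem.Set.update_nil_left] using h

lemma enumerate_map {α β : Type} (l : List α) (f : α → β) (s : Int) :
    PySem.List.enumerate (l.map f) s = (PySem.List.enumerate l s).map (fun p => (p.1, f p.2)) := by
  induction l generalizing s with
  | nil => simp [PySem.List.enumerate]
  | cons a t ih => simp [PySem.List.enumerate_cons, ih]

lemma filter_beq_pairwise (l : List Int) (hl : l.Pairwise (· < ·)) (c : Int) :
    l.filter (fun x => x == c) = if c ∈ l then [c] else [] := by
  induction l with
  | nil => simp
  | cons a t ih =>
    rw [List.filter_cons]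
    by_cases h : a = c
    · have hct : c ∉ t := fun hc => by
        have := (List.pairwise_cons.mp hl).1 c hc
        omega
      simp [h, ih (List.Pairwise.of_cons hl), hct]
    · have h' : ¬ c = a := fun hh => h hh.symm
      simp [h, h', ih (List.Pairwise.of_cons hl)]

lemma flat_filter_eq (l : List (Int × Int)) (g : Int → List Int) (ci cl0 : Int)
    (h : ∀ r ∈ l, (g r.2).filter (fun c => c == ci) = if r.2 = cl0 then [ci] else []) :
    (l.flatMap (fun r => (((g r.2).filter (fun c => c == ci)).map (fun _ => r.1)))) =
      (l.filter (fun r => r.2 == cl0)).map (·.1) := by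
  induction l with
  | nil => simp
  | cons r t ih =>
    rw [List.flatMap_cons, List.filter_cons, h r List.mem_cons_self,
      ih (fun r hr => h r (List.mem_cons_of_mem _ hr))]
    by_cases hr : r.2 = cl0 <;> simp [hr]

lemma ctc_filter (clusters : List Int) (n : Int)
    {p : Int × Int} (hp : p ∈ pvPairs (pvU clusters) n) {ci : Int}
    (hci : p.1 ≤ ci ∧ ci < p.2) {c2 : Int} (hc2 : c2 ∈ pvU clusters) :
    ((pvCTC (pvU clusters) n).getD c2 []).filter (fun c => c == ci) =
      if c2 = p.1 then [ci] else [] := by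
  obtain ⟨q, hq, hq1⟩ := pvPairs_exists (pvU clusters) n hc2
  rw [← hq1, getD_pvCTC _ _ (pvU_pairwise clusters) hq,
    filter_beq_pairwise _ (PySem.List.pairwise_lt_pyRange_one _ _) ci]
  by_cases hc : q.1 = p.1
  · have hqp : q = p := pvPairs_fst_inj _ _ (pvU_pairwise clusters) hq hp hc
    subst hqp
    simp [PySem.List.mem_pyRange_one.mpr hci]
  · have hnm : ci ∉ PySem.List.pyRange q.1 q.2 1 := by
      intro hmem
      exact hc (congrArg Prod.fst
        (pvPairs_disjoint _ _ (pvU_pairwise clusters) hq hp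
          (PySem.List.mem_pyRange_one.mp hmem) hci))
    simp [hc, hnm]

lemma pvDA_flat (clusters : List Int) (n : Int) :
    pvDA clusters n =
      ((PySem.List.enumerate (pvG clusters n) 0).flatMap
          (fun q => q.2.map (fun c => (q.1, c)))).foldl
        (fun d r => d.modify r.2 [] (· ++ [r.1])) PySem.Dict.empty := by
  simp only [pvDA, List.foldl_flatMap, List.foldl_map]

lemma getD_pvDA (clusters : List Int) (n : Int)
    {p : Int × Int} (hp : p ∈ pvPairs (pvU clusters) n) {ci : Int}
    (hci : p.1 ≤ ci ∧ ci < p.2) :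
    (pvDA clusters n).getD ci [] = (pvG2 clusters).getD p.1 [] := by
  rw [pvDA_flat, getD_foldl_modify_snd, getD_pvG2]
  simp only [PySem.Dict.getD_empty, List.nil_append]
  rw [show pvG clusters n =
      clusters.map (fun cl => (pvCTC (pvU clusters) n).getD cl []) from rfl,
    enumerate_map, List.flatMap_map, List.filter_flatMap, List.map_flatMap]
  simp only [List.filter_map, Function.comp_def, List.map_map]
  apply flat_filter_eq (PySem.List.enumerate clusters) (fun c2 => (pvCTC (pvU clusters) n).getD c2 []) ci p.1
  intro r hr
  apply ctc_filter clusters n hp hci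
  obtain ⟨k, hk, hrk⟩ := (PySem.List.mem_enumerate_iff _ _ _).mp hr
  rw [mem_pvU, hrk]
  exact List.getElem_mem hk

lemma keys_pvDA_mem (clusters : List Int) (n : Int) (x : Int) :
    x ∈ (pvDA clusters n).keys ↔ x ∈ pvAll (pvU clusters) n := by
  rw [pvDA_flat, PySem.Dict.keys_foldl_modify_key]
  simp only [PySem.Dict.keys_empty, PySem.Set.update_nil_left, List.map_flatMap, List.map_map]
  rw [PySem.Set.mem_ofList, mem_pvAll]
  simp only [List.mem_flatMap, PySem.List.mem_enumerate_iff, Function.comp_def,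
    List.map_id']
  constructor
  · rintro ⟨q, ⟨k, hk, rfl⟩, hx⟩
    simp only [pvG, List.length_map] at hk
    simp only [pvG, List.getElem_map] at hx
    have hcl : clusters[k] ∈ pvU clusters := (mem_pvU _ _).mpr (List.getElem_mem hk)
    obtain ⟨q', hq', hq'1⟩ := pvPairs_exists (pvU clusters) n hcl
    rw [← hq'1, getD_pvCTC _ _ (pvU_pairwise clusters) hq'] at hx
    exact ⟨q', hq', PySem.List.mem_pyRange_one.mp hx⟩
  · rintro ⟨pr, hpr, hb⟩
    have h1 : pr.1 ∈ pvU clusters := by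
      rw [← map_fst_pvPairs (pvU clusters) n]
      exact List.mem_map_of_mem hpr
    obtain ⟨k, hk, hke⟩ := List.mem_iff_getElem.mp ((mem_pvU _ _).mp h1)
    have hk' : k < (pvG clusters n).length := by simpa [pvG] using hk
    refine ⟨(0 + (k : Int), (pvG clusters n)[k]), ⟨k, hk', rfl⟩, ?_⟩
    simp only [pvG, List.getElem_map, hke]
    rw [getD_pvCTC _ _ (pvU_pairwise clusters) hpr]
    exact PySem.List.mem_pyRange_one.mpr hb

lemma keys_pvDA_nodup (clusters : List Int) (n : Int) : (pvDA clusters n).keys.Nodup := by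
  rw [pvDA_flat, PySem.Dict.keys_foldl_modify_key]
  simp only [PySem.Dict.keys_empty, PySem.Set.update_nil_left]
  exact PySem.Set.nodup_ofList _

lemma sorted_keys_pvDA (clusters : List Int) (n : Int) :
    PySem.List.sorted (pvDA clusters n).keys (fun x => x) = pvAll (pvU clusters) n := by
  apply PySem.List.sorted_eq_of_perm_of_pairwise_lt
  · exact (List.perm_ext_iff_of_nodup
      ((pvAll_pairwise _ _ (pvU_pairwise clusters)).imp (fun h => ne_of_lt h))
      (keys_pvDA_nodup clusters n)).mpr (fun a => (keys_pvDA_mem clusters n a).symm)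
  · exact pvAll_pairwise _ _ (pvU_pairwise clusters)

lemma A_eq (clusters : List Int) (n : Int) :
    characterGlyphMapping clusters n =
      (pvG clusters n,
       (PySem.List.sorted (pvDA clusters n).keys (fun x => x)).map
         (fun ci => (pvDA clusters n).getD ci [])) := by
  rfl

lemma B_eq (clusters : List Int) (n : Int) :
    characterGlyphMapping_alt clusters n =
      (pvG clusters n,
       (pvPairs (pvU clusters) n).flatMap
         (fun p => List.replicate (PySem.List.pyRange p.1 p.2 1).length
           ((pvG2 clusters).getD p.1 []))) := by
  have hk := keys_pvG2 clusters
  simp only [characterGlyphMapping_alt]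
  rw [show ((PySem.List.enumerate clusters 0).foldl
      (fun d p => d.modify p.2 [] (· ++ [p.1])) PySem.Dict.empty).keys
      = PySem.Set.ofList clusters from hk]
  show (clusters.map (fun cl =>
      ((pvPairs (pvU clusters) n).foldl
        (fun (st : PySem.Dict Int (List Int) × List (List Int)) p =>
          (st.1.insert p.1 (PySem.List.pyRange p.1 p.2 1),
           st.2 ++ List.replicate (PySem.List.pyRange p.1 p.2 1).length
             ((pvG2 clusters).getD p.1 [])))
        (PySem.Dict.empty, [])).1.getD cl []),
     ((pvPairs (pvU clusters) n).foldl
        (fun (st : PySem.Dict Int (List Int) × List (List Int)) p =>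
          (st.1.insert p.1 (PySem.List.pyRange p.1 p.2 1),
           st.2 ++ List.replicate (PySem.List.pyRange p.1 p.2 1).length
             ((pvG2 clusters).getD p.1 [])))
        (PySem.Dict.empty, [])).2) = _
  rw [PySem.List.foldl_prod_mk
    (fun (d : PySem.Dict Int (List Int)) (p : Int × Int) =>
      d.insert p.1 (PySem.List.pyRange p.1 p.2 1))
    (fun (acc : List (List Int)) (p : Int × Int) =>
      acc ++ List.replicate (PySem.List.pyRange p.1 p.2 1).length
        ((pvG2 clusters).getD p.1 []))]
  rw [PySem.List.foldl_append_eq_flatMap]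
  rfl

-- ===== VERDICT (by name: the statement is the Claim_ definition above) =====
theorem characterGlyphMapping_spec : Claim_equal_characterGlyphMapping := by
  intro clusters numChars _ _
  unfold Spec_characterGlyphMapping
  rw [A_eq, B_eq, sorted_keys_pvDA]
  refine Prod.ext rfl ?_
  show (pvAll (pvU clusters) numChars).map _ = _
  rw [pvAll, List.map_flatMap]
  rw [List.flatMap_def, List.flatMap_def]
  congr 1
  apply List.map_congr_left
  intro p hp
  rw [List.map_congr_left (fun ci hci =>
    getD_pvDA clusters numChars hp (PySem.List.mem_pyRange_one.mp hci))]
  exact List.map_const'
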